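-- pv_equiv track=rewrite | github.com/ZDawang/TianChi_flyAI | res/GRASP_fly_df_advance_difftype_4_4.py | findferryplan
-- ===== SOURCE A (Python) =====
-- def findferryplan(nums):
--     l = len(nums)
--     index = 0
--     num_mat = [[0 for i in range(l)] for j in range(l)]
--     res = []
--     minnum = 0
--     while(minnum < l + 1):
--     #构建数量矩阵
--         minnum = l + 1
--         minloc = [0, 0]
--         for i in range(l):
--             for j in range(l):
--                 if nums[i][j] == 1:
--                     num_mat[i][j] = min(sum(nums[i]), sum([nums[k][j] for k in range(l)]))
--                     if num_mat[i][j] < minnum: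
--                         minnum = num_mat[i][j]
--                         minloc = [i, j]
--         for k in range(l):
--             nums[minloc[0]][k] = 0
--             nums[k][minloc[1]] = 0
--         res.append(minloc)
--     return res[:-1]
-- ===== SOURCE B (Python) =====
-- def findferryplan(nums):
--     l = len(nums)
--     ones = [(i, j) for i in range(l) for j in range(l) if nums[i][j] == 1]
--     rowsum = [sum(nums[i]) for i in range(l)]
--     colsum = [sum(nums[k][j] for k in range(l)) for j in range(l)]
--     rowdead = [False] * l
--     coldead = [False] * l
--     res = []
--     while True:
--         best = None
--         for (i, j) in ones:
--             if not rowdead[i] and not coldead[j]: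
--                 c = min(rowsum[i], colsum[j])
--                 if best is None or c < best[0]:
--                     best = (c, i, j)
--         if best is None or best[0] >= l + 1:
--             return res
--         _, r, c0 = best
--         res.append([r, c0])
--         for j in range(l):
--             if not coldead[j]:
--                 colsum[j] -= nums[r][j]
--         for i in range(l):
--             if not rowdead[i]:
--                 rowsum[i] -= nums[i][c0]
--         rowdead[r] = True
--         coldead[c0] = True
-- ===== Notes on version B (the rewrite author's own statement) =====
-- stated objective: faster
-- what changed: B replaces A's per-round matrix rescans by a one-time candidate list of the 1-cells plus row/column sums computed once and maintained incrementally with dead-row/dead-column flags: each greedy round scans only the candidate list and updates the sums in O(l) by subtracting the zeroed row and column, never touching the matrix again; B also does not mutate its argument.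
import Mathlib
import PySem

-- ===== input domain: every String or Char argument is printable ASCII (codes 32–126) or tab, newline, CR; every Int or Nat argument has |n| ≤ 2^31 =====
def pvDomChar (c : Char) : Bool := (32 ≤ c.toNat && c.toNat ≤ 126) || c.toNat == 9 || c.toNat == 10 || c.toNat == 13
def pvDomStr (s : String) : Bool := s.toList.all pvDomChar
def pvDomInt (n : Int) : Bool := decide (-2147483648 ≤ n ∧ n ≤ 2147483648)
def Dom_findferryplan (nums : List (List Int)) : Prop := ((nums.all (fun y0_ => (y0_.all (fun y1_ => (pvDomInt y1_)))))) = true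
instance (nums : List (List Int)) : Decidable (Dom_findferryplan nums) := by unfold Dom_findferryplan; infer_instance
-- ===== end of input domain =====

-- B drops A's per-round matrix rescans: it extracts the 1-cell candidate list and the row/column
-- sums ONCE and maintains the sums incrementally with dead-row/dead-column flags (objective:
-- faster). Python A mutates its argument in place; B does not — the equivalence proved here is
-- about the RETURN value only.

-- ===== PORT A =====
-- low-level primitives (exact Python indexing/assignment): nums[i][j] reads and
-- nums[r][k] = 0 / nums[k][c] = 0 writes; the 1-cell count is used only as fuel (the while
-- loop runs at most one step per 1-cell, plus a final round).
def pvGetRow (mat : List (List Int)) (i : Int) : List Int := PySem.List.pyGetD mat i []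
def pvGet2 (mat : List (List Int)) (i j : Int) : Int := PySem.List.pyGetD (pvGetRow mat i) j 0
def pvSet0 (mat : List (List Int)) (i j : Int) : List (List Int) :=
  mat.modify i.toNat (fun row => row.set j.toNat 0)
-- 'for k in range(l): nums[r][k] = 0; nums[k][c] = 0'
def pvZero (l r c : Int) (mat : List (List Int)) : List (List Int) :=
  (PySem.List.pyRange 0 l 1).foldl (fun m k => pvSet0 (pvSet0 m r k) k c) mat
def pvCountOnes (mat : List (List Int)) : Nat :=
  (mat.map (fun row => row.countP (fun x => x == 1))).sum

-- sum(nums[i]) and sum([nums[k][j] for k in range(l)])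
def pvRowSum (mat : List (List Int)) (i : Int) : Int := (pvGetRow mat i).sum
def pvColSum (l : Int) (mat : List (List Int)) (j : Int) : Int :=
  ((PySem.List.pyRange 0 l 1).map (fun k => pvGet2 mat k j)).sum
-- A's double scan: state (minnum, minloc); num_mat[i][j] is written and read back in the
-- same branch and never read elsewhere, so it is represented by the local value v.
def pvScanA (l : Int) (mat : List (List Int)) : Int × Int × Int :=
  (PySem.List.pyRange 0 l 1).foldl (fun s i =>
    (PySem.List.pyRange 0 l 1).foldl (fun s j =>
      if pvGet2 mat i j == 1 then
        let v := min (pvRowSum mat i) (pvColSum l mat j)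
        if v < s.1 then (v, i, j) else s
      else s) s) (l + 1, 0, 0)
-- the while loop; fuel = pvCountOnes nums + 1 always suffices (every continuing round zeroes
-- a current 1-cell), so the fuel-0 branch is unreachable; it is shaped like the terminal round.
def pvLoopA (l : Int) : Nat → List (List Int) → List (List Int) → List (List Int)
  | 0, _, res => res ++ [[0, 0]]
  | fuel + 1, mat, res =>
    let s := pvScanA l mat
    let mat' := pvZero l s.2.1 s.2.2 mat
    let res' := res ++ [[s.2.1, s.2.2]]
    if s.1 < l + 1 then pvLoopA l fuel mat' res' else res'
def findferryplan (nums : List (List Int)) : List (List Int) :=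
  PySem.List.slice (pvLoopA nums.length (pvCountOnes nums + 1) nums []) none (some (-1))

-- ===== PORT B =====
-- ones = [(i, j) for i in range(l) for j in range(l) if nums[i][j] == 1]
def pvOnesList (nums : List (List Int)) (l : Int) : List (Int × Int) :=
  (PySem.List.pyRange 0 l 1).flatMap (fun i =>
    (PySem.List.pyRange 0 l 1).filterMap (fun j =>
      if pvGet2 nums i j == 1 then some (i, j) else none))
-- B's scan runs over the candidate list only, skipping dead rows/columns, and the cost is a
-- lookup in the maintained rowsum / colsum arrays.
def pvScanC (rowsum colsum : List Int) (rowdead coldead : List Bool)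
    (ones : List (Int × Int)) : Option (Int × Int × Int) :=
  ones.foldl (fun b p =>
    if !(PySem.List.pyGetD rowdead p.1 false) && !(PySem.List.pyGetD coldead p.2 false) then
      let c := min (PySem.List.pyGetD rowsum p.1 0) (PySem.List.pyGetD colsum p.2 0)
      match b with
      | none => some (c, p.1, p.2)
      | some t => if c < t.1 then some (c, p.1, p.2) else b
    else b) none
-- 'for j in range(l): if not coldead[j]: colsum[j] -= nums[r][j]'
def pvUpdCol (nums : List (List Int)) (l r : Int) (coldead : List Bool) (colsum : List Int) :
    List Int :=
  (PySem.List.pyRange 0 l 1).foldl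
    (fun cs j => if PySem.List.pyGetD coldead j false then cs
                 else cs.modify j.toNat (fun x => x - pvGet2 nums r j)) colsum
-- 'for i in range(l): if not rowdead[i]: rowsum[i] -= nums[i][c0]'
def pvUpdRow (nums : List (List Int)) (l c : Int) (rowdead : List Bool) (rowsum : List Int) :
    List Int :=
  (PySem.List.pyRange 0 l 1).foldl
    (fun rs i => if PySem.List.pyGetD rowdead i false then rs
                 else rs.modify i.toNat (fun x => x - pvGet2 nums i c)) rowsum
-- the 'while True' loop; the matrix is never read here — only the candidate list, the sums and
-- the dead flags. fuel = pvCountOnes nums + 1 suffices (each continuing round kills a fresh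
-- candidate's row), so the fuel-0 branch is unreachable.
def pvLoopC (nums : List (List Int)) (l : Int) :
    Nat → List Int → List Int → List Bool → List Bool → List (Int × Int) → List (List Int) →
    List (List Int)
  | 0, _, _, _, _, _, res => res
  | fuel + 1, rowsum, colsum, rowdead, coldead, ones, res =>
    match pvScanC rowsum colsum rowdead coldead ones with
    | none => res
    | some t =>
      if t.1 < l + 1 then
        pvLoopC nums l fuel
          (pvUpdRow nums l t.2.2 rowdead rowsum)
          (pvUpdCol nums l t.2.1 coldead colsum)
          (rowdead.set t.2.1.toNat true) (coldead.set t.2.2.toNat true)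
          ones (res ++ [[t.2.1, t.2.2]])
      else res
def findferryplan_alt (nums : List (List Int)) : List (List Int) :=
  pvLoopC nums nums.length (pvCountOnes nums + 1)
    ((PySem.List.pyRange 0 nums.length 1).map (fun i => pvRowSum nums i))
    ((PySem.List.pyRange 0 nums.length 1).map (fun j => pvColSum nums.length nums j))
    (List.replicate nums.length false) (List.replicate nums.length false)
    (pvOnesList nums nums.length) []

-- ===== PRECONDITION & SPEC =====
-- Python A raises IndexError exactly when some row is shorter than len(nums) (the scan reads
-- nums[i][j] for all i, j < l); Pre_ admits every input on which A returns.
def Pre_findferryplan (nums : List (List Int)) : Prop :=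
  ∀ row ∈ nums, nums.length ≤ row.length
instance (nums : List (List Int)) : Decidable (Pre_findferryplan nums) := by
  unfold Pre_findferryplan; infer_instance
def pvWitness_findferryplan : List (List Int) := [[1, 0], [0, 1]]
def Spec_findferryplan (nums : List (List Int)) (out : List (List Int)) : Prop := out = findferryplan_alt nums
instance (nums : List (List Int)) (out : List (List Int)) : Decidable (Spec_findferryplan nums out) := by unfold Spec_findferryplan; infer_instance

-- ===== CLAIM (what is proved, stated in full; the proofs are below) =====
def Claim_equal_findferryplan : Prop := ∀ (nums : List (List Int)), Dom_findferryplan nums → Pre_findferryplan nums → Spec_findferryplan nums (findferryplan nums)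

-- ===== LEMMAS AND PROOFS =====

-- nonnegative Python indexing is plain getElem?
theorem pvGetD_nonneg {α : Type} (xs : List α) (i : Int) (d : α) (h : 0 ≤ i) :
    PySem.List.pyGetD xs i d = (xs[i.toNat]?).getD d := by
  simp only [PySem.List.pyGetD, PySem.List.pyGet?, PySem.List.pyIdx?]
  simp only [h, if_true]
  split_ifs with h2
  · simp
  · rw [List.getElem?_eq_none (by omega : xs.length ≤ i.toNat)]
    simp

-- pointwise effect of a single assignment nums[n][p] = 0
theorem pvGetRow_pvSet0_ne (m : List (List Int)) (n p i : Int)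
    (hi : 0 ≤ i) (hn : 0 ≤ n) (hne : i ≠ n) :
    pvGetRow (pvSet0 m n p) i = pvGetRow m i := by
  have hnn : ¬ n.toNat = i.toNat := by omega
  simp [pvGetRow, pvSet0, pvGetD_nonneg _ _ _ hi, hnn]

theorem pvGetRow_pvSet0_self (m : List (List Int)) (i p : Int) (hi : 0 ≤ i) :
    pvGetRow (pvSet0 m i p) i = (pvGetRow m i).set p.toNat 0 := by
  cases h : m[i.toNat]? with
  | none => simp [pvGetRow, pvSet0, pvGetD_nonneg _ _ _ hi, h]
  | some row => simp [pvGetRow, pvSet0, pvGetD_nonneg _ _ _ hi, h]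

theorem pvGet2_pvSet0 (m : List (List Int)) (n p i j : Int)
    (hi : 0 ≤ i) (hj : 0 ≤ j) (hn : 0 ≤ n) (hp : 0 ≤ p) :
    pvGet2 (pvSet0 m n p) i j = if i = n ∧ j = p then 0 else pvGet2 m i j := by
  by_cases hin : i = n
  · subst hin
    rw [pvGet2, pvGet2, pvGetRow_pvSet0_self m i p hi,
      pvGetD_nonneg _ _ _ hj, pvGetD_nonneg _ _ _ hj, List.getElem?_set]
    by_cases hjp : j = p
    · subst hjp
      simp only [true_and]
      split_ifs <;> rfl
    · have hpn : ¬ p.toNat = j.toNat := by omega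
      simp [hpn, hjp]
  · rw [pvGet2, pvGet2, pvGetRow_pvSet0_ne m n p i hi hn hin]
    simp [hin]

-- one step of the zeroing loop
theorem pvZeroStep_get2 (m : List (List Int)) (r c k i j : Int)
    (hr : 0 ≤ r) (hc : 0 ≤ c) (hk : 0 ≤ k) (hi : 0 ≤ i) (hj : 0 ≤ j) :
    pvGet2 (pvSet0 (pvSet0 m r k) k c) i j =
      if (i = r ∧ j = k) ∨ (i = k ∧ j = c) then 0 else pvGet2 m i j := by
  rw [pvGet2_pvSet0 _ _ _ _ _ hi hj hk hc, pvGet2_pvSet0 _ _ _ _ _ hi hj hr hk]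
  split_ifs <;> first | rfl | tauto

-- a cell once zeroed stays zero through the rest of the zeroing loop
theorem pvZeroFold_zero (r c i j : Int) (hr : 0 ≤ r) (hc : 0 ≤ c) (hi : 0 ≤ i) (hj : 0 ≤ j) :
    ∀ (ks : List Int) (m : List (List Int)), (∀ k ∈ ks, 0 ≤ k) → pvGet2 m i j = 0 →
      pvGet2 (ks.foldl (fun m k => pvSet0 (pvSet0 m r k) k c) m) i j = 0 := by
  intro ks
  induction ks with
  | nil => intro m _ h; simpa using h
  | cons k ks ih =>
    intro m hks h0
    rw [List.foldl_cons]
    apply ih _ (fun x hx => hks x (List.mem_cons_of_mem _ hx))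
    rw [pvZeroStep_get2 m r c k i j hr hc (hks k List.mem_cons_self) hi hj]
    split_ifs <;> [rfl; exact h0]

theorem pvZeroFold_row (r c j : Int) (hr : 0 ≤ r) (hc : 0 ≤ c) (hj : 0 ≤ j) :
    ∀ (ks : List Int) (m : List (List Int)), (∀ k ∈ ks, 0 ≤ k) → j ∈ ks →
      pvGet2 (ks.foldl (fun m k => pvSet0 (pvSet0 m r k) k c) m) r j = 0 := by
  intro ks
  induction ks with
  | nil => intro m _ h; simp at h
  | cons k ks ih =>
    intro m hks hmem
    rw [List.foldl_cons]
    by_cases hjk : j ∈ ks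
    · exact ih _ (fun x hx => hks x (List.mem_cons_of_mem _ hx)) hjk
    · have hj_eq : j = k := by
        rcases List.mem_cons.mp hmem with h | h
        · exact h
        · exact absurd h hjk
      subst hj_eq
      apply pvZeroFold_zero r c r j hr hc hr hj _ _
        (fun x hx => hks x (List.mem_cons_of_mem _ hx))
      rw [pvZeroStep_get2 m r c j r j hr hc (hks j List.mem_cons_self) hr hj]
      simp

theorem pvZeroFold_col (r c i : Int) (hr : 0 ≤ r) (hc : 0 ≤ c) (hi : 0 ≤ i) :
    ∀ (ks : List Int) (m : List (List Int)), (∀ k ∈ ks, 0 ≤ k) → i ∈ ks →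
      pvGet2 (ks.foldl (fun m k => pvSet0 (pvSet0 m r k) k c) m) i c = 0 := by
  intro ks
  induction ks with
  | nil => intro m _ h; simp at h
  | cons k ks ih =>
    intro m hks hmem
    rw [List.foldl_cons]
    by_cases hik : i ∈ ks
    · exact ih _ (fun x hx => hks x (List.mem_cons_of_mem _ hx)) hik
    · have hi_eq : i = k := by
        rcases List.mem_cons.mp hmem with h | h
        · exact h
        · exact absurd h hik
      subst hi_eq
      apply pvZeroFold_zero r c i c hr hc hi hc _ _
        (fun x hx => hks x (List.mem_cons_of_mem _ hx))
      rw [pvZeroStep_get2 m r c i i c hr hc (hks i List.mem_cons_self) hi hc]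
      simp

theorem pvZeroFold_other (r c i j : Int) (hr : 0 ≤ r) (hc : 0 ≤ c) (hi : 0 ≤ i) (hj : 0 ≤ j)
    (hir : i ≠ r) (hjc : j ≠ c) :
    ∀ (ks : List Int) (m : List (List Int)), (∀ k ∈ ks, 0 ≤ k) →
      pvGet2 (ks.foldl (fun m k => pvSet0 (pvSet0 m r k) k c) m) i j = pvGet2 m i j := by
  intro ks
  induction ks with
  | nil => intro m _; rfl
  | cons k ks ih =>
    intro m hks
    rw [List.foldl_cons, ih _ (fun x hx => hks x (List.mem_cons_of_mem _ hx)),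
      pvZeroStep_get2 m r c k i j hr hc (hks k List.mem_cons_self) hi hj]
    simp [hir, hjc]

-- pointwise characterisation of the zeroing of row r and column c
theorem pvGet2_pvZero (l r c i j : Int) (mat : List (List Int))
    (hr : 0 ≤ r) (hc : 0 ≤ c) (hi : 0 ≤ i) (hil : i < l) (hj : 0 ≤ j) (hjl : j < l) :
    pvGet2 (pvZero l r c mat) i j = if i = r ∨ j = c then 0 else pvGet2 mat i j := by
  unfold pvZero
  have hks : ∀ k ∈ PySem.List.pyRange 0 l 1, 0 ≤ k :=
    fun k hk => (PySem.List.mem_pyRange_one.mp hk).1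
  by_cases h1 : i = r
  · subst h1
    rw [pvZeroFold_row i c j hi hc hj _ mat hks (PySem.List.mem_pyRange_one.mpr ⟨hj, hjl⟩)]
    simp
  · by_cases h2 : j = c
    · subst h2
      rw [pvZeroFold_col r j i hr hj hi _ mat hks (PySem.List.mem_pyRange_one.mpr ⟨hi, hil⟩)]
      simp
    · rw [pvZeroFold_other r c i j hr hc hi hj h1 h2 _ mat hks]
      simp [h1, h2]

-- rows other than r are only assigned at column c
theorem pvGetRowFold_ne (r c i : Int) (hi : 0 ≤ i) (hr : 0 ≤ r) (hir : i ≠ r) :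
    ∀ (ks : List Int) (m : List (List Int)), (∀ k ∈ ks, 0 ≤ k) →
      pvGetRow (ks.foldl (fun m k => pvSet0 (pvSet0 m r k) k c) m) i =
        if i ∈ ks then (pvGetRow m i).set c.toNat 0 else pvGetRow m i := by
  intro ks
  induction ks with
  | nil => intro m _; simp
  | cons k ks ih =>
    intro m hks
    have hk : 0 ≤ k := hks k List.mem_cons_self
    have hstep : pvGetRow (pvSet0 (pvSet0 m r k) k c) i =
        if i = k then (pvGetRow m i).set c.toNat 0 else pvGetRow m i := by
      by_cases hik : i = k
      · subst hik
        rw [pvGetRow_pvSet0_self _ _ _ hi, pvGetRow_pvSet0_ne m r i i hi hr hir]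
        simp
      · rw [pvGetRow_pvSet0_ne _ k c i hi hk hik, pvGetRow_pvSet0_ne m r k i hi hr hir]
        simp [hik]
    rw [List.foldl_cons, ih _ (fun x hx => hks x (List.mem_cons_of_mem _ hx)), hstep]
    by_cases hik : i = k <;> by_cases hiks : i ∈ ks <;>
      simp [hik, hiks, List.mem_cons, List.set_set]

theorem pvGetRow_pvZero_ne (l r c i : Int) (mat : List (List Int))
    (hi : 0 ≤ i) (hil : i < l) (hr : 0 ≤ r) (hir : i ≠ r) :
    pvGetRow (pvZero l r c mat) i = (pvGetRow mat i).set c.toNat 0 := by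
  unfold pvZero
  rw [pvGetRowFold_ne r c i hi hr hir _ mat
    (fun k hk => (PySem.List.mem_pyRange_one.mp hk).1)]
  simp [PySem.List.mem_pyRange_one, hi, hil]

theorem pvSet0Len (mat : List (List Int)) (i j : Int) :
    (pvSet0 mat i j).length = mat.length := by
  simp [pvSet0]

theorem pvZeroLen (l r c : Int) (mat : List (List Int)) :
    (pvZero l r c mat).length = mat.length := by
  rw [pvZero]
  generalize PySem.List.pyRange 0 l 1 = ks
  induction ks generalizing mat with
  | nil => rfl
  | cons k ks ih => rw [List.foldl_cons, ih, pvSet0Len, pvSet0Len]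

theorem pvSet0_rowLen (m : List (List Int)) (n p i : Int) (hi : 0 ≤ i) :
    (pvGetRow (pvSet0 m n p) i).length = (pvGetRow m i).length := by
  cases h : m[i.toNat]? with
  | none => simp [pvGetRow, pvSet0, pvGetD_nonneg _ _ _ hi, List.getElem?_modify, h]
  | some row =>
    simp only [pvGetRow, pvSet0, pvGetD_nonneg _ _ _ hi, List.getElem?_modify, h,
      Option.getD_some]
    split_ifs <;> simp

theorem pvZero_rowLen (l r c i : Int) (mat : List (List Int)) (hi : 0 ≤ i) :
    (pvGetRow (pvZero l r c mat) i).length = (pvGetRow mat i).length := by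
  rw [pvZero]
  generalize PySem.List.pyRange 0 l 1 = ks
  induction ks generalizing mat with
  | nil => rfl
  | cons k ks ih =>
    rw [List.foldl_cons, ih, pvSet0_rowLen _ _ _ _ hi, pvSet0_rowLen _ _ _ _ hi]

-- sums after the zeroing
theorem pvSumSetZero (xs : List Int) (n : Nat) (h : n < xs.length) :
    (xs.set n 0).sum = xs.sum - xs[n] := by
  rw [List.sum_set]
  have h2 := List.sum_take_add_sum_drop xs n
  have h3 : xs.drop n = xs[n] :: xs.drop (n + 1) := List.drop_eq_getElem_cons h
  rw [h3, List.sum_cons] at h2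
  simp only [if_pos h]
  omega

theorem pvRowSum_pvZero_ne (l r c i : Int) (mat : List (List Int))
    (hi : 0 ≤ i) (hil : i < l) (hr : 0 ≤ r) (hir : i ≠ r) (hc : 0 ≤ c) (hcl : c < l)
    (hlen : l ≤ ((pvGetRow mat i).length : Int)) :
    pvRowSum (pvZero l r c mat) i = pvRowSum mat i - pvGet2 mat i c := by
  have hclen : c.toNat < (pvGetRow mat i).length := by omega
  unfold pvRowSum
  rw [pvGetRow_pvZero_ne l r c i mat hi hil hr hir, pvSumSetZero _ _ hclen,
    pvGet2, pvGetD_nonneg _ _ _ hc, List.getElem?_eq_getElem hclen, Option.getD_some]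

theorem pvSumMapDrop (f : Int → Int) (r : Int) :
    ∀ (ks : List Int), ks.Nodup → r ∈ ks →
      (ks.map (fun k => if k = r then 0 else f k)).sum = (ks.map f).sum - f r := by
  intro ks
  induction ks with
  | nil => intro _ h; simp at h
  | cons a ks ih =>
    intro hnd hmem
    rcases List.mem_cons.mp hmem with rfl | hmem'
    · have hnotin : r ∉ ks := (List.nodup_cons.mp hnd).1
      rw [List.map_cons, List.map_cons, List.sum_cons, List.sum_cons, if_pos rfl]
      have hmap : ks.map (fun k => if k = r then 0 else f k) = ks.map f :=
        List.map_congr_left (fun k hk => by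
          have hkr : k ≠ r := fun h => hnotin (h ▸ hk)
          simp [hkr])
      rw [hmap]; ring
    · have hne : a ≠ r := by rintro rfl; exact (List.nodup_cons.mp hnd).1 hmem'
      simp only [List.map_cons, List.sum_cons, if_neg hne]
      rw [ih (List.nodup_cons.mp hnd).2 hmem']; ring

theorem pvColSum_pvZero_ne (l r c j : Int) (mat : List (List Int))
    (hj : 0 ≤ j) (hjl : j < l) (hc : 0 ≤ c) (hjc : j ≠ c) (hr : 0 ≤ r) (hrl : r < l) :
    pvColSum l (pvZero l r c mat) j = pvColSum l mat j - pvGet2 mat r j := by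
  unfold pvColSum
  have hmap : (PySem.List.pyRange 0 l 1).map (fun k => pvGet2 (pvZero l r c mat) k j) =
      (PySem.List.pyRange 0 l 1).map (fun k => if k = r then 0 else pvGet2 mat k j) :=
    List.map_congr_left (fun k hk => by
      obtain ⟨hk0, hkl⟩ := PySem.List.mem_pyRange_one.mp hk
      rw [pvGet2_pvZero l r c k j mat hr hc hk0 hkl hj hjl]
      by_cases hkr : k = r <;> simp [hkr, hjc])
  rw [hmap, pvSumMapDrop (fun k => pvGet2 mat k j) r _
    (PySem.List.nodup_pyRange_one 0 l) (PySem.List.mem_pyRange_one.mpr ⟨hr, hrl⟩)]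

-- reading a boolean flag list after setting one flag
theorem pvGetD_set {α : Type} (xs : List α) (n q : Int) (a d : α)
    (hq : 0 ≤ q) (hn : 0 ≤ n) (hlen : n.toNat < xs.length) :
    PySem.List.pyGetD (xs.set n.toNat a) q d = if q = n then a else PySem.List.pyGetD xs q d := by
  rw [pvGetD_nonneg _ _ _ hq, pvGetD_nonneg _ _ _ hq, List.getElem?_set]
  by_cases h : q = n
  · subst h; simp [hlen]
  · have hne : ¬ n.toNat = q.toNat := by omega
    simp [hne, h]

-- the incremental sum updates, pointwise
theorem pvUpdFold_notmem (dead : List Bool) (v : Int → Int) (q : Int) (hq : 0 ≤ q) :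
    ∀ (ks : List Int) (cs : List Int), (∀ k ∈ ks, 0 ≤ k) → q ∉ ks →
      PySem.List.pyGetD
        (ks.foldl (fun cs k => if PySem.List.pyGetD dead k false then cs
                               else cs.modify k.toNat (fun x => x - v k)) cs) q 0
        = PySem.List.pyGetD cs q 0 := by
  intro ks
  induction ks with
  | nil => intro cs _ _; rfl
  | cons k ks ih =>
    intro cs hks hq'
    have hk : 0 ≤ k := hks k List.mem_cons_self
    have hqk : q ≠ k := fun h => hq' (h ▸ List.mem_cons_self)
    rw [List.foldl_cons, ih _ (fun x hx => hks x (List.mem_cons_of_mem _ hx))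
      (fun h => hq' (List.mem_cons_of_mem _ h))]
    by_cases hd : PySem.List.pyGetD dead k false
    · simp [hd]
    · have hne : ¬ k.toNat = q.toNat := by omega
      simp [hd, pvGetD_nonneg _ _ _ hq, hne]

theorem pvUpdFold_len (dead : List Bool) (v : Int → Int) :
    ∀ (ks : List Int) (cs : List Int),
      (ks.foldl (fun cs k => if PySem.List.pyGetD dead k false then cs
                             else cs.modify k.toNat (fun x => x - v k)) cs).length = cs.length := by
  intro ks
  induction ks with
  | nil => intro cs; rfl
  | cons k ks ih =>
    intro cs
    rw [List.foldl_cons, ih]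
    split_ifs <;> simp

theorem pvUpdFold_mem (dead : List Bool) (v : Int → Int) (q : Int) (hq : 0 ≤ q) :
    ∀ (ks : List Int) (cs : List Int), ks.Nodup → (∀ k ∈ ks, 0 ≤ k) → q ∈ ks →
      q.toNat < cs.length →
      PySem.List.pyGetD
        (ks.foldl (fun cs k => if PySem.List.pyGetD dead k false then cs
                               else cs.modify k.toNat (fun x => x - v k)) cs) q 0
        = if PySem.List.pyGetD dead q false then PySem.List.pyGetD cs q 0
          else PySem.List.pyGetD cs q 0 - v q := by
  intro ks
  induction ks with
  | nil => intro cs _ _ h _; simp at h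
  | cons a ks ih =>
    intro cs hnd hks hmem hlen
    rcases List.mem_cons.mp hmem with rfl | hmem'
    · rw [List.foldl_cons, pvUpdFold_notmem dead v q hq ks _
        (fun x hx => hks x (List.mem_cons_of_mem _ hx)) (List.nodup_cons.mp hnd).1]
      by_cases hd : PySem.List.pyGetD dead q false
      · simp [hd]
      · simp [hd, pvGetD_nonneg _ _ _ hq, List.getElem?_eq_getElem hlen]
    · have hqa : q ≠ a := by rintro rfl; exact (List.nodup_cons.mp hnd).1 hmem'
      have ha : 0 ≤ a := hks a List.mem_cons_self
      have hstep : PySem.List.pyGetD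
          (if PySem.List.pyGetD dead a false then cs
           else cs.modify a.toNat (fun x => x - v a)) q 0 = PySem.List.pyGetD cs q 0 := by
        by_cases hd : PySem.List.pyGetD dead a false
        · simp [hd]
        · have hne : ¬ a.toNat = q.toNat := by omega
          simp [hd, pvGetD_nonneg _ _ _ hq, hne]
      have hlen' : q.toNat <
          (if PySem.List.pyGetD dead a false then cs
           else cs.modify a.toNat (fun x => x - v a)).length := by
        split_ifs <;> simpa
      rw [List.foldl_cons, ih _ (List.nodup_cons.mp hnd).2
        (fun x hx => hks x (List.mem_cons_of_mem _ hx)) hmem' hlen', hstep]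

-- the invariant tying B's incremental state to A's mutated matrix
def pvInv (nums mat : List (List Int)) (rowsum colsum : List Int)
    (rowdead coldead : List Bool) : Prop :=
  mat.length = nums.length ∧
  rowsum.length = nums.length ∧ colsum.length = nums.length ∧
  rowdead.length = nums.length ∧ coldead.length = nums.length ∧
  (∀ i : Int, 0 ≤ i → i < (nums.length : Int) →
    (nums.length : Int) ≤ ((pvGetRow mat i).length : Int)) ∧
  (∀ i j : Int, 0 ≤ i → i < (nums.length : Int) → 0 ≤ j → j < (nums.length : Int) →
    pvGet2 mat i j =
      if PySem.List.pyGetD rowdead i false || PySem.List.pyGetD coldead j false then 0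
      else pvGet2 nums i j) ∧
  (∀ i : Int, 0 ≤ i → i < (nums.length : Int) → PySem.List.pyGetD rowdead i false = false →
    PySem.List.pyGetD rowsum i 0 = pvRowSum mat i) ∧
  (∀ j : Int, 0 ≤ j → j < (nums.length : Int) → PySem.List.pyGetD coldead j false = false →
    PySem.List.pyGetD colsum j 0 = pvColSum (nums.length : Int) mat j)

-- membership in the candidate list
theorem pvMem_OnesList (nums : List (List Int)) (l r c : Int) :
    (r, c) ∈ pvOnesList nums l ↔
      (0 ≤ r ∧ r < l ∧ 0 ≤ c ∧ c < l ∧ pvGet2 nums r c = 1) := by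
  simp only [pvOnesList, List.mem_flatMap, List.mem_filterMap, PySem.List.mem_pyRange_one,
    Option.ite_none_right_eq_some, Option.some.injEq, Prod.mk.injEq, beq_iff_eq]
  constructor
  · rintro ⟨i, ⟨hi0, hil⟩, j, ⟨⟨hj0, hjl⟩, h1, rfl, rfl⟩⟩
    exact ⟨hi0, hil, hj0, hjl, h1⟩
  · rintro ⟨hr0, hrl, hc0, hcl, h1⟩
    exact ⟨r, ⟨hr0, hrl⟩, c, ⟨⟨hc0, hcl⟩, h1, rfl, rfl⟩⟩

-- a successful scan names a live candidate
theorem pvScanC_some (rowsum colsum : List Int) (rowdead coldead : List Bool)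
    (ones : List (Int × Int)) (t : Int × Int × Int)
    (h : pvScanC rowsum colsum rowdead coldead ones = some t) :
    (t.2.1, t.2.2) ∈ ones ∧ PySem.List.pyGetD rowdead t.2.1 false = false ∧
      PySem.List.pyGetD coldead t.2.2 false = false := by
  have H : ∀ u : Int × Int × Int, pvScanC rowsum colsum rowdead coldead ones = some u →
      ((u.2.1, u.2.2) ∈ ones ∧ PySem.List.pyGetD rowdead u.2.1 false = false ∧
        PySem.List.pyGetD coldead u.2.2 false = false) := by
    unfold pvScanC
    apply List.foldlRecOn ones _
      (motive := fun b => ∀ u : Int × Int × Int, b = some u →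
        ((u.2.1, u.2.2) ∈ ones ∧ PySem.List.pyGetD rowdead u.2.1 false = false ∧
          PySem.List.pyGetD coldead u.2.2 false = false))
    · intro u hu; simp at hu
    · intro b hb p hp u hu
      by_cases ha : (!(PySem.List.pyGetD rowdead p.1 false) &&
          !(PySem.List.pyGetD coldead p.2 false)) = true
      · rw [if_pos ha] at hu
        have hflags : PySem.List.pyGetD rowdead p.1 false = false ∧
            PySem.List.pyGetD coldead p.2 false = false := by
          simpa [Bool.and_eq_true, Bool.not_eq_true'] using ha
        cases b with
        | none =>
          obtain rfl := Option.some.inj hu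
          exact ⟨by simpa using hp, hflags.1, hflags.2⟩
        | some t' =>
          dsimp only at hu
          split_ifs at hu
          · obtain rfl := Option.some.inj hu
            exact ⟨by simpa using hp, hflags.1, hflags.2⟩
          · exact hb u hu
      · rw [if_neg ha] at hu
        exact hb u hu
  exact H t h

-- generic paired-fold lemma: a relation preserved by the two step functions is preserved
-- by the two folds.
theorem pvFoldlRel {α β γ : Type} (R : α → β → Prop) (xs : List γ)
    (f : α → γ → α) (g : β → γ → β) :
    ∀ (a : α) (b : β), R a b → (∀ a b x, x ∈ xs → R a b → R (f a x) (g b x)) →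
      R (xs.foldl f a) (xs.foldl g b) := by
  induction xs with
  | nil => intro a b h _; exact h
  | cons x xs ih =>
    intro a b h hstep
    exact ih _ _ (hstep a b x (List.mem_cons_self) h)
      (fun a b y hy => hstep a b y (List.mem_cons_of_mem _ hy))

-- the relation between A's sentinel state and B's Option state
def pvRel (l : Int) (sA : Int × Int × Int) : Option (Int × Int × Int) → Prop
  | none => sA = (l + 1, 0, 0)
  | some t => if t.1 < l + 1 then sA = t else sA = (l + 1, 0, 0)

-- under the invariant, A's matrix scan and B's candidate scan agree
theorem pvScanRelC (nums mat : List (List Int)) (rowsum colsum : List Int)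
    (rowdead coldead : List Bool)
    (hInv : pvInv nums mat rowsum colsum rowdead coldead) :
    pvRel (nums.length : Int) (pvScanA (nums.length : Int) mat)
      (pvScanC rowsum colsum rowdead coldead (pvOnesList nums (nums.length : Int))) := by
  obtain ⟨hml, hrsl, hcsl, hrdl, hcdl, hrowlen, hcell, hrs, hcs⟩ := hInv
  unfold pvScanA pvScanC pvOnesList
  rw [List.foldl_flatMap]
  simp only [List.foldl_filterMap]
  apply pvFoldlRel (pvRel (nums.length : Int))
  · simp [pvRel]
  · intro a b i hi hR
    apply pvFoldlRel (pvRel (nums.length : Int)) _ _ _ _ _ hR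
    intro a b j hj hR'
    obtain ⟨hi0, hil⟩ := PySem.List.mem_pyRange_one.mp hi
    obtain ⟨hj0, hjl⟩ := PySem.List.mem_pyRange_one.mp hj
    by_cases horig : pvGet2 nums i j = 1
    · simp only [horig, beq_self_eq_true, if_pos]
      by_cases hrd : PySem.List.pyGetD rowdead i false
      · have hA : pvGet2 mat i j = 0 := by
          rw [hcell i j hi0 hil hj0 hjl]; simp [hrd]
        simp only [hA, hrd]
        norm_num
        exact hR'
      · by_cases hcd : PySem.List.pyGetD coldead j false
        · have hA : pvGet2 mat i j = 0 := by
            rw [hcell i j hi0 hil hj0 hjl]; simp [hcd]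
          simp only [hA, hrd, hcd]
          norm_num
          exact hR'
        · have hA : pvGet2 mat i j = 1 := by
            rw [hcell i j hi0 hil hj0 hjl]; simp [hrd, hcd, horig]
          have hv : min (PySem.List.pyGetD rowsum i 0) (PySem.List.pyGetD colsum j 0) =
              min (pvRowSum mat i) (pvColSum (nums.length : Int) mat j) := by
            rw [hrs i hi0 hil (by simpa using hrd), hcs j hj0 hjl (by simpa using hcd)]
          simp only [hA, hrd, hcd, beq_self_eq_true, if_pos, Bool.not_false, Bool.and_self,
            hv]
          cases b with
          | none =>
            simp only [pvRel] at hR' ⊢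
            subst hR'
            split_ifs with h1 <;> simp_all
          | some t =>
            simp only [pvRel] at hR' ⊢
            split_ifs at hR' ⊢ with h1 h2 h3 <;> subst hR' <;> simp_all <;> omega
    · have hA1 : (pvGet2 mat i j == 1) = false := by
        rw [hcell i j hi0 hil hj0 hjl]
        split_ifs <;> simp [horig]
      have hB1 : (pvGet2 nums i j == 1) = false := by simp [horig]
      simp only [hA1, hB1, Bool.false_eq_true, if_false]
      exact hR'

-- the invariant survives one greedy round
theorem pvInv_step (nums mat : List (List Int)) (rowsum colsum : List Int)
    (rowdead coldead : List Bool) (r c : Int)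
    (hInv : pvInv nums mat rowsum colsum rowdead coldead)
    (hr : 0 ≤ r) (hrl : r < (nums.length : Int)) (hc : 0 ≤ c) (hcl : c < (nums.length : Int))
    (hra : PySem.List.pyGetD rowdead r false = false)
    (hca : PySem.List.pyGetD coldead c false = false) :
    pvInv nums (pvZero (nums.length : Int) r c mat)
      (pvUpdRow nums (nums.length : Int) c rowdead rowsum)
      (pvUpdCol nums (nums.length : Int) r coldead colsum)
      (rowdead.set r.toNat true) (coldead.set c.toNat true) := by
  obtain ⟨hml, hrsl, hcsl, hrdl, hcdl, hrowlen, hcell, hrs, hcs⟩ := hInv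
  have hnodup := PySem.List.nodup_pyRange_one 0 (nums.length : Int)
  have hkspos : ∀ k ∈ PySem.List.pyRange 0 (nums.length : Int) 1, 0 ≤ k :=
    fun k hk => (PySem.List.mem_pyRange_one.mp hk).1
  refine ⟨by rw [pvZeroLen]; exact hml,
    by unfold pvUpdRow; rw [pvUpdFold_len]; exact hrsl,
    by unfold pvUpdCol; rw [pvUpdFold_len]; exact hcsl,
    by simpa using hrdl,
    by simpa using hcdl,
    ?_, ?_, ?_, ?_⟩
  · intro i hi0 hil
    rw [pvZero_rowLen _ _ _ _ _ hi0]
    exact hrowlen i hi0 hil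
  · intro i j hi0 hil hj0 hjl
    rw [pvGet2_pvZero _ r c i j mat hr hc hi0 hil hj0 hjl,
      pvGetD_set rowdead r i true false hi0 hr (by rw [hrdl]; omega),
      pvGetD_set coldead c j true false hj0 hc (by rw [hcdl]; omega)]
    by_cases h1 : i = r <;> by_cases h2 : j = c <;>
      simp [h1, h2, hcell i j hi0 hil hj0 hjl]
  · intro i hi0 hil halive
    rw [pvGetD_set rowdead r i true false hi0 hr (by rw [hrdl]; omega)] at halive
    by_cases hir : i = r
    · simp [hir] at halive
    · rw [if_neg hir] at halive
      unfold pvUpdRow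
      rw [pvUpdFold_mem rowdead (fun i => pvGet2 nums i c) i hi0 _ rowsum hnodup hkspos
        (PySem.List.mem_pyRange_one.mpr ⟨hi0, hil⟩) (by rw [hrsl]; omega), halive,
        pvRowSum_pvZero_ne _ r c i mat hi0 hil hr hir hc hcl (hrowlen i hi0 hil),
        hrs i hi0 hil halive]
      have hval : pvGet2 mat i c = pvGet2 nums i c := by
        rw [hcell i c hi0 hil hc hcl]; simp [halive, hca]
      simp [hval]
  · intro j hj0 hjl halive
    rw [pvGetD_set coldead c j true false hj0 hc (by rw [hcdl]; omega)] at halive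
    by_cases hjc : j = c
    · simp [hjc] at halive
    · rw [if_neg hjc] at halive
      unfold pvUpdCol
      rw [pvUpdFold_mem coldead (fun j => pvGet2 nums r j) j hj0 _ colsum hnodup hkspos
        (PySem.List.mem_pyRange_one.mpr ⟨hj0, hjl⟩) (by rw [hcsl]; omega), halive,
        pvColSum_pvZero_ne _ r c j mat hj0 hjl hc hjc hr hrl,
        hcs j hj0 hjl halive]
      have hval : pvGet2 mat r j = pvGet2 nums r j := by
        rw [hcell r j hr hrl hj0 hjl]; simp [halive, hra]
      simp [hval]

-- the two loops agree round for round
theorem pvLoopEqC (nums : List (List Int)) :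
    ∀ (fuel : Nat) (mat : List (List Int)) (rowsum colsum : List Int)
      (rowdead coldead : List Bool) (res : List (List Int)),
      pvInv nums mat rowsum colsum rowdead coldead →
      pvLoopA (nums.length : Int) fuel mat res =
        pvLoopC nums (nums.length : Int) fuel rowsum colsum rowdead coldead
          (pvOnesList nums (nums.length : Int)) res ++ [[0, 0]] := by
  intro fuel
  induction fuel with
  | zero => intro mat rowsum colsum rowdead coldead res _; rfl
  | succ fuel ih =>
    intro mat rowsum colsum rowdead coldead res hInv
    have hrel := pvScanRelC nums mat rowsum colsum rowdead coldead hInv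
    rw [pvLoopA, pvLoopC]
    cases hC : pvScanC rowsum colsum rowdead coldead (pvOnesList nums (nums.length : Int)) with
    | none =>
      rw [hC] at hrel
      simp only [pvRel] at hrel
      simp only [hrel, lt_irrefl, if_false]
    | some t =>
      rw [hC] at hrel
      simp only [pvRel] at hrel
      by_cases ht : t.1 < (nums.length : Int) + 1
      · rw [if_pos ht] at hrel
        obtain ⟨hmem, hraF, hcaF⟩ := pvScanC_some rowsum colsum rowdead coldead _ t hC
        obtain ⟨hr0, hrl', hc0, hcl', _⟩ := (pvMem_OnesList nums _ t.2.1 t.2.2).mp hmem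
        simp only [hrel, ht, if_true]
        exact ih _ _ _ _ _ _
          (pvInv_step nums mat rowsum colsum rowdead coldead t.2.1 t.2.2 hInv
            hr0 hrl' hc0 hcl' hraF hcaF)
      · rw [if_neg ht] at hrel
        simp only [hrel, lt_irrefl, if_false, ht]

theorem pvGetD_replicate_false (n : Nat) (i : Int) (hi : 0 ≤ i) :
    PySem.List.pyGetD (List.replicate n false) i false = false := by
  rw [pvGetD_nonneg _ _ _ hi, List.getElem?_replicate]
  split_ifs <;> rfl

theorem pvInv_init (nums : List (List Int)) (hpre : Pre_findferryplan nums) :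
    pvInv nums nums
      ((PySem.List.pyRange 0 (nums.length : Int) 1).map (fun i => pvRowSum nums i))
      ((PySem.List.pyRange 0 (nums.length : Int) 1).map
        (fun j => pvColSum (nums.length : Int) nums j))
      (List.replicate nums.length false) (List.replicate nums.length false) := by
  refine ⟨rfl,
    by simp [PySem.List.length_pyRange_one],
    by simp [PySem.List.length_pyRange_one],
    by simp, by simp, ?_, ?_, ?_, ?_⟩
  · intro i hi0 hil
    have hi' : i.toNat < nums.length := by omega
    rw [pvGetRow, pvGetD_nonneg _ _ _ hi0, List.getElem?_eq_getElem hi', Option.getD_some]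
    exact_mod_cast hpre _ (List.getElem_mem hi')
  · intro i j hi0 hil hj0 hjl
    rw [pvGetD_replicate_false _ _ hi0, pvGetD_replicate_false _ _ hj0]
    simp
  · intro i hi0 hil _
    rw [PySem.List.pyGetD_map_pyRange_of_nonneg _ _ _ _ hi0 hil]
  · intro j hj0 hjl _
    rw [PySem.List.pyGetD_map_pyRange_of_nonneg _ _ _ _ hj0 hjl]

-- ===== VERDICT (by name: the statement is the Claim_ definition above) =====
theorem findferryplan_spec : Claim_equal_findferryplan := by
  intro nums _ hpre
  unfold Spec_findferryplan findferryplan findferryplan_alt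
  rw [pvLoopEqC nums _ nums _ _ _ _ _ (pvInv_init nums hpre),
    PySem.List.slice_to_neg_one, List.dropLast_concat]
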